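-- pv_equiv track=rewrite | github.com/KSerg2022/lessons_homework | Lesson_12/main_encrypt.py | get_crypt_table
-- ===== SOURCE A (Python) =====
-- def get_crypt_table(normalize_text, crypt_key):
--     """Creates character columns in table."""
--     columns_table = []
--     for position_in_string in range(len(crypt_key)):
--         step = 0 + position_in_string
--         column_table = []
--         for _ in range(len(normalize_text)):
--             if step < len(normalize_text):
--                 column_table.append(normalize_text[step])
--                 step += len(crypt_key)
--         columns_table.append(''.join(column_table))
--     return dict(zip(crypt_key, columns_table))
-- ===== SOURCE B (Python) =====
-- def get_crypt_table(normalize_text, crypt_key):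
--     """Creates character columns in table (chunk-then-transpose)."""
--     k = len(crypt_key)
--     if k == 0:
--         return {}
--     rows = [normalize_text[j:j + k] for j in range(0, len(normalize_text), k)]
--     columns = [''.join(row[i] for row in rows if i < len(row)) for i in range(k)]
--     return dict(zip(crypt_key, columns))
-- ===== Notes on version B (the rewrite author's own statement) =====
-- stated objective: faster
-- what changed: A walks the whole text once per key character with a step-counter loop of fixed length len(text); B chunks the text into rows of length k by slicing and transposes the grid, touching each character once.
import Mathlib
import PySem

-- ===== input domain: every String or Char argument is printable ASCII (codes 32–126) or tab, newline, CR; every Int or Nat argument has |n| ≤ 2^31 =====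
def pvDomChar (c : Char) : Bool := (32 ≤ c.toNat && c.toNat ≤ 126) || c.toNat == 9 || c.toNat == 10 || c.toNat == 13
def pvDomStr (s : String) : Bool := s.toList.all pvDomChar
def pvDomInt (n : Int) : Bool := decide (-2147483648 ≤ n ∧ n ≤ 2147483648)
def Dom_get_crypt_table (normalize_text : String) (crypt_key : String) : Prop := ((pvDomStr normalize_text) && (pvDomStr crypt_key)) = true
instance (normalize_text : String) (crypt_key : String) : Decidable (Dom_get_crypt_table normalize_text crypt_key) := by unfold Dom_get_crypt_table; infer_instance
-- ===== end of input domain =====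

-- B is a chunk-then-transpose re-implementation of A's per-column step loop; equivalence of the return value is proved below.

-- shared final step of both Pythons: dict(zip(crypt_key, columns)), keys as 1-char strings
def pvDictZip (ks : List Char) (vs : List String) : List (String × String) :=
  (PySem.Dict.ofList (List.zip (ks.map (fun c => String.ofList [c])) vs)).items

-- ===== PORT A =====
def get_crypt_table (normalize_text : String) (crypt_key : String) : List (String × String) :=
  let cs := normalize_text.toList
  let ks := crypt_key.toList
  let columns_table := (List.range ks.length).foldl
    (fun columns_table position_in_string =>
      let column := ((List.range cs.length).foldl
        (fun (st : Nat × List Char) _ =>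
          if st.1 < cs.length then (st.1 + ks.length, st.2 ++ [cs.getD st.1 ' ']) else st)
        (0 + position_in_string, ([] : List Char))).2
      columns_table ++ [String.ofList column]) []
  pvDictZip ks columns_table

-- ===== PORT B =====
def get_crypt_table_alt (normalize_text : String) (crypt_key : String) : List (String × String) :=
  let k := crypt_key.toList.length
  if k = 0 then []
  else
    let cs := normalize_text.toList
    let rows := (PySem.List.pyRange 0 (cs.length : Int) (k : Int)).map
      (fun j => PySem.List.slice cs (some j) (some (j + (k : Int))))
    let columns := (List.range k).map
      (fun i => String.ofList (rows.filterMap (fun row => row[i]?)))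
    pvDictZip crypt_key.toList columns

-- ===== PRECONDITION & SPEC =====
def Spec_get_crypt_table (normalize_text : String) (crypt_key : String) (out : List (String × String)) : Prop := out = get_crypt_table_alt normalize_text crypt_key
instance (normalize_text : String) (crypt_key : String) (out : List (String × String)) : Decidable (Spec_get_crypt_table normalize_text crypt_key out) := by unfold Spec_get_crypt_table; infer_instance

-- ===== CLAIM (what is proved, stated in full; the proofs are below) =====
def Claim_equal_get_crypt_table : Prop := ∀ (normalize_text : String) (crypt_key : String), Dom_get_crypt_table normalize_text crypt_key → Spec_get_crypt_table normalize_text crypt_key (get_crypt_table normalize_text crypt_key)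

-- ===== LEMMAS AND PROOFS =====

def pvEvery (k' i : Nat) (cs : List Char) : List Char :=
  if i < cs.length then cs.getD i ' ' :: pvEvery k' i (cs.drop (k' + 1)) else []
termination_by cs.length
decreasing_by
  calc (cs.drop (k' + 1)).length = cs.length - (k' + 1) := by rw [List.length_drop]
    _ < cs.length := by omega

theorem pvEvery_of_lt {k' i : Nat} {cs : List Char} (h : i < cs.length) :
    pvEvery k' i cs = cs.getD i ' ' :: pvEvery k' i (cs.drop (k' + 1)) := by
  rw [pvEvery]; simp [h]

theorem pvEvery_of_ge {k' i : Nat} {cs : List Char} (h : cs.length ≤ i) :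
    pvEvery k' i cs = [] := by
  rw [pvEvery]; simp [Nat.not_lt.mpr h]

theorem pvEvery_eq_drop (k' : Nat) (cs : List Char) (i : Nat) :
    pvEvery k' i cs = pvEvery k' 0 (cs.drop i) := by
  by_cases h : i < cs.length
  · have h0 : 0 < (cs.drop i).length := by rw [List.length_drop]; omega
    rw [pvEvery_of_lt h, pvEvery_of_lt h0]
    have hg : (cs.drop i).getD 0 ' ' = cs.getD i ' ' := by
      simp [List.getD_eq_getElem?_getD, List.getElem?_drop]
    rw [hg, List.drop_drop]
    rw [pvEvery_eq_drop k' (cs.drop (k' + 1)) i, List.drop_drop]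
    have : i + (k' + 1) = k' + 1 + i := by omega
    rw [this]
  · rw [pvEvery_of_ge (Nat.le_of_not_lt h), pvEvery_of_ge (by rw [List.length_drop]; omega)]
termination_by cs.length
decreasing_by rw [List.length_drop]; omega

theorem pvA_loop (cs : List Char) (k' : Nat) :
    ∀ (l : List Nat) (s : Nat) (acc : List Char), cs.length ≤ l.length + s →
    ((l.foldl (fun (st : Nat × List Char) _ =>
        if st.1 < cs.length then (st.1 + (k' + 1), st.2 ++ [cs.getD st.1 ' ']) else st)
      (s, acc)).2) = acc ++ pvEvery k' 0 (cs.drop s) := by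
  intro l
  induction l with
  | nil =>
    intro s acc h
    simp only [List.foldl_nil]
    rw [pvEvery_of_ge (by rw [List.length_drop]; simp at h; omega)]
    simp
  | cons x l IH =>
    intro s acc h
    simp only [List.foldl_cons]
    by_cases hs : s < cs.length
    · simp only [hs, if_true]
      rw [IH (s + (k' + 1)) _ (by simp at h ⊢; omega)]
      have h0 : 0 < (cs.drop s).length := by rw [List.length_drop]; omega
      rw [pvEvery_of_lt h0, List.drop_drop]
      have hg : (cs.drop s).getD 0 ' ' = cs.getD s ' ' := by
        simp [List.getD_eq_getElem?_getD, List.getElem?_drop]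
      rw [hg]
      have : s + (k' + 1) = k' + 1 + s := by omega
      rw [this]
      simp
    · simp only [hs, if_false]
      exact IH s acc (by simp at h ⊢; omega)

theorem pvChunks (k' : Nat) :
    ∀ (m : Nat) (cs : List Char) (i : Nat), i < k' + 1 → cs.length ≤ m * (k' + 1) →
    ((List.range m).map (fun t => (cs.drop (t * (k' + 1))).take (k' + 1))).filterMap
      (fun row => row[i]?) = pvEvery k' i cs := by
  intro m
  induction m with
  | zero =>
    intro cs i hi hlen
    simp only [List.range_zero, List.map_nil, List.filterMap_nil]
    rw [pvEvery_of_ge (by omega)]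
  | succ m IH =>
    intro cs i hi hlen
    rw [List.range_succ_eq_map]
    simp only [List.map_cons, List.map_map, List.filterMap_cons, Nat.zero_mul, List.drop_zero]
    have hexp : (m + 1) * (k' + 1) = m * (k' + 1) + (k' + 1) := by ring
    rw [hexp] at hlen
    have hmap : (List.range m).map ((fun t => (cs.drop (t * (k' + 1))).take (k' + 1)) ∘ Nat.succ)
        = (List.range m).map (fun t => ((cs.drop (k' + 1)).drop (t * (k' + 1))).take (k' + 1)) := by
      apply List.map_congr_left
      intro t _
      simp only [Function.comp_apply, List.drop_drop]
      have : Nat.succ t * (k' + 1) = k' + 1 + t * (k' + 1) := by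
        simp only [Nat.succ_eq_add_one]; ring
      rw [this]
    have hIH := IH (cs.drop (k' + 1)) i hi (by rw [List.length_drop]; omega)
    by_cases hlt : i < cs.length
    · have : (cs.take (k' + 1))[i]? = some (cs.getD i ' ') := by
        simp [hi, List.getElem?_eq_getElem hlt]
      rw [this]
      rw [pvEvery_of_lt hlt, hmap, hIH]
    · have : (cs.take (k' + 1))[i]? = none := by
        simp only [List.getElem?_take, hi, if_true]
        exact List.getElem?_eq_none (by omega)
      rw [this]
      rw [pvEvery_of_ge (by omega), hmap, hIH,
        pvEvery_of_ge (by rw [List.length_drop]; omega)]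

theorem pvB_col (cs : List Char) (k' i : Nat) (hi : i < k' + 1) :
    (((PySem.List.pyRange 0 (cs.length : Int) ((k' + 1 : Nat) : Int)).map
        (fun j => PySem.List.slice cs (some j) (some (j + ((k' + 1 : Nat) : Int))))).filterMap
      (fun row => row[i]?)) = pvEvery k' i cs := by
  have hK : (0 : Int) < ((k' + 1 : Nat) : Int) := by exact_mod_cast Nat.succ_pos k'
  rw [PySem.List.pyRange_of_pos _ _ hK, List.map_map]
  by_cases hn : (0 : Int) < (cs.length : Int)
  · rw [if_pos hn]
    set K : Int := ((k' + 1 : Nat) : Int) with hKdef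
    set N : Int := (cs.length : Int) with hNdef
    set q : Int := (N - 0 + K - 1) / K with hqdef
    have hq0 : 0 ≤ q := Int.ediv_nonneg (by omega) (by omega)
    have heq : K * q + (N - 0 + K - 1) % K = N - 0 + K - 1 := Int.mul_ediv_add_emod (N - 0 + K - 1) K
    have hr1 : 0 ≤ (N - 0 + K - 1) % K := Int.emod_nonneg _ (by omega)
    have hr2 : (N - 0 + K - 1) % K < K := Int.emod_lt_of_pos _ (by omega)
    have hNKq : N ≤ K * q := by linarith
    have hbound : cs.length ≤ q.toNat * (k' + 1) := by
      have hcast : ((q.toNat * (k' + 1) : Nat) : Int) = q * K := by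
        rw [hKdef]; push_cast [Int.toNat_of_nonneg hq0]; ring
      have h2 : N ≤ ((q.toNat * (k' + 1) : Nat) : Int) := by rw [hcast]; linarith
      rw [hNdef] at h2
      exact_mod_cast h2
    have hfun : ∀ t ∈ List.range q.toNat,
        ((fun j => PySem.List.slice cs (some j) (some (j + K))) ∘ fun t : Nat => 0 + K * (t : Int)) t
          = (fun t : Nat => (cs.drop (t * (k' + 1))).take (k' + 1)) t := by
      intro t _
      simp only [Function.comp_apply]
      have e1 : (0 : Int) + K * (t : Int) = ((t * (k' + 1) : Nat) : Int) := by
        rw [hKdef]; push_cast; ring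
      rw [e1, show ((t * (k' + 1) : Nat) : Int) + K = ((t * (k' + 1) : Nat) : Int) + ((k' + 1 : Nat) : Int) from by rw [hKdef]]
      exact PySem.List.slice_natCast_add cs (t * (k' + 1)) (k' + 1)
    rw [List.map_congr_left hfun]
    exact pvChunks k' q.toNat cs i hi hbound
  · rw [if_neg hn]
    simp only [List.range_zero, List.map_nil, List.filterMap_nil]
    rw [pvEvery_of_ge (by omega)]

-- ===== VERDICT (by name: the statement is the Claim_ definition above) =====
theorem get_crypt_table_spec : Claim_equal_get_crypt_table := by
  unfold Claim_equal_get_crypt_table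
  intro nt ck _
  unfold Spec_get_crypt_table get_crypt_table get_crypt_table_alt
  dsimp only
  cases hk : ck.toList.length with
  | zero =>
    have hnil : ck.toList = [] := List.length_eq_zero_iff.mp hk
    rw [hnil]
    rfl
  | succ k' =>
    rw [if_neg (Nat.succ_ne_zero k')]
    rw [PySem.List.foldl_append_singleton_eq_map]
    rw [List.nil_append]
    congr 1
    apply List.map_congr_left
    intro i hiRange
    have hi : i < k' + 1 := List.mem_range.mp hiRange
    congr 1
    rw [pvA_loop nt.toList k' (List.range nt.toList.length) (0 + i) []
      (by rw [List.length_range]; omega)]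
    rw [pvB_col nt.toList k' i hi]
    rw [List.nil_append, Nat.zero_add]
    exact (pvEvery_eq_drop k' nt.toList i).symm
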